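-- pv_equiv track=rewrite | github.com/TurtleSmoke/Project-Euler | problems/problem_0025/solution1.py | thousandth_digit_fibonacci_number
-- ===== SOURCE A (Python) =====
-- def thousandth_digit_fibonacci_number(n=1000):
--     f1 = 1
--     f2 = 1
--     res = 1
--     while len(str(f1)) < n:
--         f1, f2 = f2, f1 + f2
--         res += 1
--
--     return res
-- ===== SOURCE B (Python) =====
-- def thousandth_digit_fibonacci_number(n=1000):
--     if n <= 1:
--         return 1
--     t = 10 ** (n - 1)
--
--     def fib_pair(k):
--         # (F_k, F_{k+1}) by fast doubling
--         if k == 0: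
--             return (0, 1)
--         a, b = fib_pair(k // 2)
--         c = a * (2 * b - a)
--         d = a * a + b * b
--         if k % 2 == 1:
--             return (d, c + d)
--         return (c, d)
--
--     def fib(k):
--         return fib_pair(k)[0]
--
--     hi = 1
--     while fib(hi) < t:
--         hi *= 2
--     lo = 1
--     while lo < hi:
--         mid = (lo + hi) // 2
--         if fib(mid) >= t:
--             hi = mid
--         else:
--             lo = mid + 1
--     return lo
-- ===== Notes on version B (the rewrite author's own statement) =====
-- stated objective: faster
-- what changed: Replaces the per-index linear loop with str() digit counting by a power-of-ten threshold plus an exponential search to bracket and a binary search to locate the least index, each candidate Fibonacci number computed directly by integer fast doubling.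
import Mathlib
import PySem

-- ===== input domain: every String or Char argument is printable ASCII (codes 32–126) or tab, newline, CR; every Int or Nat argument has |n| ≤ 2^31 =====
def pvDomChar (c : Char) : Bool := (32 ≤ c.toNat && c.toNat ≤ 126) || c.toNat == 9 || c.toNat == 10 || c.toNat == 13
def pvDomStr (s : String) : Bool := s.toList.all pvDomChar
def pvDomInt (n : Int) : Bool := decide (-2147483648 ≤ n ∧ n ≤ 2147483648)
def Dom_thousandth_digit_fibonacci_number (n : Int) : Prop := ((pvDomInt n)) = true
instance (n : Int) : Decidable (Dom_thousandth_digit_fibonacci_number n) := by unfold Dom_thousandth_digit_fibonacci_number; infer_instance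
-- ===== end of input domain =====

-- B replaces A's linear scan with str() digit test by threshold 10^(n-1) + exponential/binary search
-- over fast-doubling Fibonacci values (measured faster).


-- ===== PORT A =====
-- A's while loop; the fuel only makes the recursion total (it is large enough that the loop
-- always terminates by its own condition before fuel runs out; proved below).
def pvLoopA (fuel : Nat) (n : Int) (f1 f2 res : Int) : Int :=
  match fuel with
  | 0 => res
  | fuel + 1 =>
    if PySem.Str.len (PySem.Int.toStr f1) < n then
      pvLoopA fuel n f2 (f1 + f2) (res + 1)
    else res

def thousandth_digit_fibonacci_number (n : Int) : Int :=
  pvLoopA (10 ^ (n - 1).toNat + 2) n 1 1 1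

-- ===== PORT B =====
-- (F_k, F_{k+1}) by fast doubling, as in Source B (values are nonnegative ints, so Nat is exact;
-- 2*b - a never truncates since F_k ≤ F_{k+1}).
-- fuel = k bounds the recursion depth (k halves each call); it only makes the recursion structural
def pvFibPair : Nat → Nat → Nat × Nat
  | _, 0 => (0, 1)
  | 0, _ + 1 => (0, 1)  -- fuel exhausted, never reached when k ≤ fuel (proved below)
  | fuel + 1, k + 1 =>
    let p := pvFibPair fuel ((k + 1) / 2)
    let a := p.1
    let b := p.2
    let c := a * (2 * b - a)
    let d := a * a + b * b
    if (k + 1) % 2 = 1 then (d, c + d) else (c, d)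

def pvFib (k : Nat) : Nat := (pvFibPair k k).1

-- 'while fib(hi) < t: hi *= 2'; fuel only for totality, large enough (proved below).
def pvExpSearch (fuel : Nat) (t hi : Nat) : Nat :=
  match fuel with
  | 0 => hi
  | fuel + 1 => if pvFib hi < t then pvExpSearch fuel t (hi * 2) else hi

-- 'while lo < hi: …' binary search; fuel only makes the loop structural (hi - lo shrinks each step)
def pvBinSearch : Nat → Nat → Nat → Nat → Nat
  | 0, _, lo, _ => lo
  | fuel + 1, t, lo, hi =>
    if lo < hi then
      let mid := (lo + hi) / 2
      if t ≤ pvFib mid then pvBinSearch fuel t lo mid else pvBinSearch fuel t (mid + 1) hi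
    else lo

def thousandth_digit_fibonacci_number_alt (n : Int) : Int :=
  if n ≤ 1 then 1
  else
    let t : Nat := 10 ^ (n - 1).toNat  -- 10 ** (n - 1), exact since n ≥ 2 here
    let hi := pvExpSearch (t + 2) t 1
    ((pvBinSearch hi t 1 hi : Nat) : Int)

-- ===== PRECONDITION & SPEC =====
def Spec_thousandth_digit_fibonacci_number (n : Int) (out : Int) : Prop := out = thousandth_digit_fibonacci_number_alt n
instance (n : Int) (out : Int) : Decidable (Spec_thousandth_digit_fibonacci_number n out) := by unfold Spec_thousandth_digit_fibonacci_number; infer_instance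

-- ===== CLAIM (what is proved, stated in full; the proofs are below) =====
def Claim_equal_thousandth_digit_fibonacci_number : Prop := ∀ (n : Int), Dom_thousandth_digit_fibonacci_number n → Spec_thousandth_digit_fibonacci_number n (thousandth_digit_fibonacci_number n)

-- ===== LEMMAS AND PROOFS =====

-- str-length of a natural number is log₁₀ + 1
lemma pv_toDigitsCore_len : ∀ (f m : Nat), m < f →
    (Nat.toDigitsCore 10 f m []).length = Nat.log 10 m + 1 := by
  intro f
  induction f with
  | zero => intro m h; omega
  | succ f ih =>
    intro m h
    rw [Nat.toDigitsCore]
    by_cases h10 : m / 10 = 0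
    · have hlt : m < 10 := by omega
      simp [h10, Nat.log_of_lt hlt]
    · simp only [h10, reduceIte]
      rw [Nat.toDigitsCore_lens_eq]
      have hm : 10 ≤ m := by omega
      rw [ih (m / 10) (by omega)]
      have h1 : Nat.log 10 (m / 10) = Nat.log 10 m - 1 := Nat.log_div_base 10 m
      have h2 : 0 < Nat.log 10 m := Nat.log_pos (by norm_num) hm
      omega

lemma pv_strlen_nat (m : Nat) :
    PySem.Str.len (PySem.Int.toStr (m : Int)) = ((Nat.log 10 m + 1 : Nat) : Int) := by
  have h1 : (PySem.Int.toStr (m : Int)).toList = PySem.Int.toChars (m : Int) :=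
    PySem.Int.toList_toStr _
  simp only [PySem.Str.len, h1, PySem.Int.toChars]
  rw [if_neg (by omega)]
  rw [Nat.toDigits]
  simp only [Int.toNat_natCast]
  rw [pv_toDigitsCore_len (m + 1) m (by omega)]

-- Fibonacci grows at least linearly
lemma pv_fib_ge : ∀ k : Nat, k ≤ Nat.fib (k + 1) := by
  intro k
  induction k using Nat.strong_induction_on with
  | _ k ih =>
    match k with
    | 0 => simp
    | 1 => simp
    | (k + 2) =>
      have h1 := ih (k + 1) (by omega)
      have h2 : 0 < Nat.fib (k + 1) := Nat.fib_pos.mpr (by omega)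
      have h3 : Nat.fib (k + 2 + 1) = Nat.fib (k + 1) + Nat.fib (k + 1 + 1) :=
        Nat.fib_add_two
      omega

-- fast doubling is Fibonacci
lemma pv_fibPair_eq : ∀ fuel k : Nat, k ≤ fuel → pvFibPair fuel k = (Nat.fib k, Nat.fib (k + 1)) := by
  intro fuel
  induction fuel with
  | zero =>
    intro k hk
    have : k = 0 := by omega
    subst this
    rfl
  | succ fuel ih =>
    intro k hk
    match k with
    | 0 => rfl
    | (k + 1) =>
      rw [pvFibPair, ih ((k + 1) / 2) (by omega)]
      set m := (k + 1) / 2 with hm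
      have hc : Nat.fib m * (2 * Nat.fib (m + 1) - Nat.fib m) = Nat.fib (2 * m) :=
        (Nat.fib_two_mul m).symm
      have hd : Nat.fib m * Nat.fib m + Nat.fib (m + 1) * Nat.fib (m + 1)
          = Nat.fib (2 * m + 1) := by
        rw [Nat.fib_two_mul_add_one]; ring
      by_cases hp : (k + 1) % 2 = 1
      · have hk : k + 1 = 2 * m + 1 := by omega
        have hcd : Nat.fib (2 * m) + Nat.fib (2 * m + 1) = Nat.fib (2 * m + 2) :=
          (Nat.fib_add_two).symm
        have e2 : k + 1 + 1 = 2 * m + 2 := by omega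
        simp only [hp, if_pos]
        rw [hk]
        exact Prod.ext (by simpa using hd)
          (by rw [show 2 * m + 1 + 1 = 2 * m + 2 from rfl, ← hcd, ← hc, ← hd])
      · have hk : k + 1 = 2 * m := by omega
        have e2 : k + 1 + 1 = 2 * m + 1 := by omega
        simp only [hp, if_neg, not_false_iff]
        rw [hk]
        exact Prod.ext (by simpa using hc) (by simpa using hd)

lemma pv_fib_eq (k : Nat) : pvFib k = Nat.fib k := by
  simp [pvFib, pv_fibPair_eq k k le_rfl]

-- the digit-length test against n is the threshold test against 10^(n-1)
lemma pv_bridge (n : Int) (hn : 2 ≤ n) (k : Nat) (hk : 1 ≤ k) :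
    (PySem.Str.len (PySem.Int.toStr (Nat.fib k : Int)) < n) ↔
      Nat.fib k < 10 ^ (n - 1).toNat := by
  rw [pv_strlen_nat]
  have hfib : Nat.fib k ≠ 0 := by
    have : 0 < Nat.fib k := Nat.fib_pos.mpr (by omega)
    omega
  rw [← Nat.log_lt_iff_lt_pow (by norm_num) hfib]
  omega

-- A's loop reaches the least index r with the test failing
lemma pv_loopA_eq (n : Int) (r : Nat)
    (hrP : ¬ (PySem.Str.len (PySem.Int.toStr (Nat.fib r : Int)) < n))
    (hmin : ∀ j, 1 ≤ j → j < r → (PySem.Str.len (PySem.Int.toStr (Nat.fib j : Int)) < n)) :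
    ∀ fuel i, 1 ≤ i → i ≤ r → r ≤ i + fuel →
      pvLoopA fuel n (Nat.fib i) (Nat.fib (i + 1)) (i : Int) = (r : Int) := by
  intro fuel
  induction fuel with
  | zero =>
    intro i h1 h2 h3
    have : i = r := by omega
    subst this
    rfl
  | succ fuel ih =>
    intro i h1 h2 h3
    rw [pvLoopA]
    by_cases hir : i = r
    · subst hir
      rw [if_neg hrP]
    · rw [if_pos (hmin i h1 (by omega))]
      have e1 : (Nat.fib i : Int) + (Nat.fib (i + 1) : Int) = ((Nat.fib (i + 1 + 1) : Nat) : Int) := by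
        rw [Nat.fib_add_two]; push_cast; ring
      have e2 : ((i : Int) + 1) = ((i + 1 : Nat) : Int) := by push_cast; ring
      rw [e1, e2]
      exact ih (i + 1) (by omega) (by omega) (by omega)

lemma pv_expSearch_spec (t : Nat) : ∀ fuel hi, 1 ≤ hi →
    (∃ j, j ≤ fuel ∧ t ≤ Nat.fib (hi * 2 ^ j)) →
    1 ≤ pvExpSearch fuel t hi ∧ t ≤ Nat.fib (pvExpSearch fuel t hi) := by
  intro fuel
  induction fuel with
  | zero =>
    rintro hi h1 ⟨j, hj, ht⟩
    have hj0 : j = 0 := by omega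
    subst hj0
    simp only [pow_zero, mul_one] at ht
    exact ⟨h1, ht⟩
  | succ fuel ih =>
    rintro hi h1 ⟨j, hj, ht⟩
    rw [pvExpSearch]
    by_cases hc : pvFib hi < t
    · rw [if_pos hc]
      rw [pv_fib_eq] at hc
      have hj0 : j ≠ 0 := by
        rintro rfl
        simp only [pow_zero, mul_one] at ht
        omega
      refine ih (hi * 2) (by omega) ⟨j - 1, by omega, ?_⟩
      have e : hi * 2 * 2 ^ (j - 1) = hi * 2 ^ j := by
        rw [mul_assoc]
        congr 1
        rw [← pow_succ']
        congr 1
        omega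
      rw [e]
      exact ht
    · rw [if_neg hc]
      rw [pv_fib_eq] at hc
      exact ⟨h1, by omega⟩

lemma pv_binSearch_spec (t : Nat) : ∀ fuel lo hi, hi - lo ≤ fuel → 1 ≤ lo → lo ≤ hi →
    t ≤ Nat.fib hi → (∀ j, j < lo → Nat.fib j < t) →
    1 ≤ pvBinSearch fuel t lo hi ∧ t ≤ Nat.fib (pvBinSearch fuel t lo hi) ∧
      ∀ j, j < pvBinSearch fuel t lo hi → Nat.fib j < t := by
  intro fuel
  induction fuel with
  | zero =>
    intro lo hi hd h1 hlh hP hlow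
    have : lo = hi := by omega
    exact ⟨h1, this ▸ hP, hlow⟩
  | succ fuel ih =>
    intro lo hi hd h1 hlh hP hlow
    rw [pvBinSearch]
    by_cases hlt : lo < hi
    · rw [if_pos hlt]
      simp only
      by_cases hm : t ≤ pvFib ((lo + hi) / 2)
      · rw [if_pos hm]
        rw [pv_fib_eq] at hm
        exact ih lo ((lo + hi) / 2) (by omega) h1 (by omega) hm hlow
      · rw [if_neg hm]
        rw [pv_fib_eq] at hm
        refine ih ((lo + hi) / 2 + 1) hi (by omega) (by omega) (by omega) hP ?_
        intro j hj
        have : Nat.fib j ≤ Nat.fib ((lo + hi) / 2) := Nat.fib_mono (by omega)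
        omega
    · rw [if_neg hlt]
      have : lo = hi := by omega
      exact ⟨h1, this ▸ hP, hlow⟩

-- ===== VERDICT (by name: the statement is the Claim_ definition above) =====
theorem thousandth_digit_fibonacci_number_spec : Claim_equal_thousandth_digit_fibonacci_number := by
  intro n _
  unfold Spec_thousandth_digit_fibonacci_number
  by_cases hn : n ≤ 1
  · -- both return 1
    unfold thousandth_digit_fibonacci_number thousandth_digit_fibonacci_number_alt
    rw [if_pos hn]
    have hf : (n - 1).toNat = 0 := by omega
    rw [hf]
    have hlen : PySem.Str.len (PySem.Int.toStr 1) = 1 := by decide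
    show pvLoopA 3 n 1 1 1 = 1
    rw [pvLoopA, if_neg (by rw [hlen]; omega)]
  · have hn2 : 2 ≤ n := by omega
    set t := 10 ^ (n - 1).toNat with htdef
    have ht10 : 10 ≤ t := by
      have h1 : 1 ≤ (n - 1).toNat := by omega
      calc 10 = 10 ^ 1 := by norm_num
        _ ≤ 10 ^ (n - 1).toNat := Nat.pow_le_pow_right (by norm_num) h1
    -- B's searches find the least index r ≥ 1 with t ≤ fib r
    have hexist : ∃ j, j ≤ t + 2 ∧ t ≤ Nat.fib (1 * 2 ^ j) := by
      refine ⟨t + 1, by omega, ?_⟩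
      have hp : t + 1 ≤ 2 ^ (t + 1) := by
        have := Nat.lt_two_pow_self (n := t)
        have h2 : 2 ^ t ≤ 2 ^ (t + 1) := Nat.pow_le_pow_right (by norm_num) (by omega)
        omega
      have hge := pv_fib_ge (2 ^ (t + 1) - 1)
      have he : 2 ^ (t + 1) - 1 + 1 = 2 ^ (t + 1) := by
        have : 0 < 2 ^ (t + 1) := Nat.pow_pos (by norm_num)
        omega
      rw [he] at hge
      rw [one_mul]
      omega
    obtain ⟨hhi1, hhiP⟩ := pv_expSearch_spec t (t + 2) 1 le_rfl hexist
    obtain ⟨hr1, hrP, hrmin⟩ :=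
      pv_binSearch_spec t (pvExpSearch (t + 2) t 1) 1 (pvExpSearch (t + 2) t 1)
        (by omega) le_rfl hhi1 hhiP
        (by intro j hj
            have hj0 : j = 0 := by omega
            subst hj0
            simp only [Nat.fib_zero]
            omega)
    set r := pvBinSearch (pvExpSearch (t + 2) t 1) t 1 (pvExpSearch (t + 2) t 1) with hrdef
    -- r is small enough for A's fuel
    have hrle : r ≤ t + 1 := by
      by_contra hgt
      have := hrmin (t + 1) (by omega)
      have := pv_fib_ge t
      omega
    -- A's loop reaches the same r
    have hA : thousandth_digit_fibonacci_number n = (r : Int) := by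
      unfold thousandth_digit_fibonacci_number
      rw [← htdef]
      have := pv_loopA_eq n r
        (by rw [pv_bridge n hn2 r hr1]; omega)
        (by intro j hj1 hjr; rw [pv_bridge n hn2 j hj1]; exact hrmin j hjr)
        (t + 2) 1 le_rfl (by omega) (by omega)
      simpa [Nat.fib_one, Nat.fib_two] using this
    have hB : thousandth_digit_fibonacci_number_alt n = (r : Int) := by
      unfold thousandth_digit_fibonacci_number_alt
      rw [if_neg (by omega)]
    rw [hA, hB]
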